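-- pv_equiv track=rewrite | github.com/FlipperDripper/otus_algorithms | src/hw1/tickets.py | gen_array
-- ===== SOURCE A (Python) =====
-- def gen_array(prev_array):
--     delta_length = 9
--     new_arr_len = len(prev_array) + delta_length
--     new_arr = [None] * (new_arr_len)
--     for i in range(new_arr_len, 0, -1):
--         s = sum(prev_array[max(0, i - 10): i])
--         new_arr[i - 1] = s
--     return new_arr
-- ===== SOURCE B (Python) =====
-- def gen_array(prev_array):
--     n = len(prev_array)
--     # prefix sums: P[k] = sum of first k elements
--     P = [0]
--     s = 0
--     for x in prev_array:
--         s += x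
--         P.append(s)
--     # window [max(0, p-9), p+1) looked up in O(1) via prefix-sum differences
--     return [P[min(p + 1, n)] - P[max(0, p - 9)] for p in range(n + 9)]
-- ===== Notes on version B (the rewrite author's own statement) =====
-- stated objective: alternative
-- what changed: Replaces per-cell slice-and-sum (each window of up to 10 elements re-summed, written via a backwards index loop into a preallocated array) with one prefix-sum pass followed by a forward comprehension that computes each bounded-window sum as an O(1) difference of two prefix sums.
import Mathlib
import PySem

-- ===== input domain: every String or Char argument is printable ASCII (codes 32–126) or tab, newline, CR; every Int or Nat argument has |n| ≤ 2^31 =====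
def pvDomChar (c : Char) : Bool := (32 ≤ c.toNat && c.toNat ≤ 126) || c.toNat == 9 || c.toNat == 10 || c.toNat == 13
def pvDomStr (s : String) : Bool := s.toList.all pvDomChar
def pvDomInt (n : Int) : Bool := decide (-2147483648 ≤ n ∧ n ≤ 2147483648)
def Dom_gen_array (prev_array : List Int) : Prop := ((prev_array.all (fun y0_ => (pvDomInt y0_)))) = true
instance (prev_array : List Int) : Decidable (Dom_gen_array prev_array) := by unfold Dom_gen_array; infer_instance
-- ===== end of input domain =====

-- B replaces A's per-cell slice-and-sum backwards loop by a prefix-sum table plus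
-- an O(1)-difference forward pass (alternative algorithm, same asymptotic cost).


-- ===== PORT A =====
-- literal port of A: new_arr = [None]*(n+9) is modelled as replicate with placeholder 0;
-- every cell is overwritten by the loop, so the placeholder never survives.
def gen_array (prev_array : List Int) : List Int :=
  let delta_length : Int := 9
  let new_arr_len : Int := (prev_array.length : Int) + delta_length
  let new_arr : List Int := List.replicate new_arr_len.toNat 0
  (PySem.List.pyRange new_arr_len 0 (-1)).foldl
    (fun new_arr i =>
      let s : Int := (PySem.List.slice prev_array (some (max 0 (i - 10))) (some i)).sum
      new_arr.set (i - 1).toNat s)   -- i ≥ 1 throughout the loop, so i-1 is a valid nonnegative index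
    new_arr

-- ===== PORT B =====
-- port of Source B; P[idx] is ported with pyGetD (both indices are always in range, proved below, so this is exact)
def gen_array_alt (prev_array : List Int) : List Int :=
  let n : Int := (prev_array.length : Int)
  let P : List Int :=
    (prev_array.foldl (fun (ps : List Int × Int) x =>
        let s := ps.2 + x
        (ps.1 ++ [s], s)) ([0], 0)).1
  (PySem.List.pyRange 0 (n + 9) 1).map
    (fun p => PySem.List.pyGetD P (min (p + 1) n) 0 - PySem.List.pyGetD P (max 0 (p - 9)) 0)

-- ===== PRECONDITION & SPEC =====
def Spec_gen_array (prev_array : List Int) (out : List Int) : Prop := out = gen_array_alt prev_array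
instance (prev_array : List Int) (out : List Int) : Decidable (Spec_gen_array prev_array out) := by unfold Spec_gen_array; infer_instance

-- ===== CLAIM (what is proved, stated in full; the proofs are below) =====
def Claim_equal_gen_array : Prop := ∀ (prev_array : List Int), Dom_gen_array prev_array → Spec_gen_array prev_array (gen_array prev_array)

-- ===== LEMMAS AND PROOFS =====

-- A's backwards write loop fills index j with f (j+1); the tail beyond m is untouched.
lemma loopA (f : Int → Int) : ∀ (m : Nat) (arr : List Int), m ≤ arr.length →
    (PySem.List.pyRange (m : Int) 0 (-1)).foldl
      (fun a i => a.set (i - 1).toNat (f i)) arr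
    = (List.range m).map (fun (j : Nat) => f ((j : Int) + 1)) ++ arr.drop m := by
  intro m
  induction m with
  | zero => intro arr h; simp [PySem.List.pyRange_neg_one_eq_nil (le_refl (0:Int))]
  | succ m ih =>
    intro arr h
    have hcast : ((m+1 : Nat) : Int) = (m : Int) + 1 := by push_cast; ring
    rw [hcast, PySem.List.pyRange_neg_one_cons (by positivity)]
    simp only [List.foldl_cons]
    have hidx : ((m : Int) + 1 - 1).toNat = m := by omega
    rw [hidx]
    have h11 : (m : Int) + 1 - 1 = (m : Int) := by ring
    rw [h11]
    rw [ih (arr.set m (f ((m:Int)+1))) (by simp; omega)]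
    have hdrop : (arr.set m (f ((m:Int)+1))).drop m = f ((m:Int)+1) :: arr.drop (m+1) := by
      rw [List.drop_eq_getElem_cons (by simp; omega)]
      simp [List.drop_set]
    rw [hdrop, List.range_succ]
    simp

-- B's prefix-sum loop, generalized over the accumulator
lemma foldP : ∀ (l acc : List Int) (s : Int),
    (l.foldl (fun (ps : List Int × Int) x => (ps.1 ++ [ps.2 + x], ps.2 + x)) (acc, s)).1
    = acc ++ (List.range l.length).map (fun k => s + (l.take (k + 1)).sum) := by
  intro l
  induction l with
  | nil => intro acc s; simp
  | cons x t ih =>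
    intro acc s
    simp only [List.foldl_cons]
    rw [ih (acc ++ [s + x]) (s + x)]
    simp [List.range_succ_eq_map, List.map_map, Function.comp, add_assoc]

-- a window sum is a difference of two prefix sums
lemma sum_drop_take (l : List Int) (a b : Nat) (hab : a ≤ b) :
    ((l.drop a).take (b - a)).sum = (l.take b).sum - (l.take a).sum := by
  have h1 : l.take b = l.take a ++ (l.drop a).take (b - a) := by
    conv_lhs => rw [← List.take_append_drop a (l.take b)]
    rw [List.take_take, min_eq_left hab, List.drop_take]
  rw [h1, List.sum_append]; ring

-- the table B builds is exactly the prefix-sum table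
lemma P_char (prev : List Int) :
    ((prev.foldl (fun (ps : List Int × Int) x => (ps.1 ++ [ps.2 + x], ps.2 + x)) ([0], 0)).1)
    = (List.range (prev.length + 1)).map (fun k => (prev.take k).sum) := by
  rw [foldP, List.range_succ_eq_map]
  simp [List.map_map, Function.comp]

-- B's table lookups are always in range and read a prefix sum
lemma P_get (prev : List Int) (i : Int) (h0 : 0 ≤ i) (h1 : i ≤ (prev.length : Int)) :
    PySem.List.pyGetD ((List.range (prev.length + 1)).map (fun k => (prev.take k).sum)) i 0
    = (prev.take i.toNat).sum := by
  rw [PySem.List.pyGetD_eq_getElem _ _ h0 (by simp; omega)]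
  simp

-- ===== VERDICT (by name: the statement is the Claim_ definition above) =====
theorem gen_array_spec : Claim_equal_gen_array := by
  intro prev _
  unfold Spec_gen_array gen_array gen_array_alt
  simp only []
  set n := prev.length with hn
  have hlen : ((n : Int) + 9) = ((n + 9 : Nat) : Int) := by push_cast; ring
  rw [hlen, loopA _ (n+9) _ (by simp; omega)]
  rw [P_char]
  rw [PySem.List.pyRange_zero_natCast (n+9), List.map_map]
  have hdrop : (List.replicate (((n+9:Nat):Int)).toNat (0:Int)).drop (n+9) = [] := by simp
  rw [hdrop, List.append_nil]
  apply List.map_congr_left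
  intro j hj
  rw [List.mem_range] at hj
  simp only [Function.comp]
  have hjn : (j : Int) < (n : Int) + 9 := by exact_mod_cast by omega
  have ha0 : (0:Int) ≤ max 0 ((j:Int) - 9) := le_max_left _ _
  have han : max 0 ((j:Int) - 9) ≤ (n:Int) := by omega
  have hb0 : (0:Int) ≤ (j:Int) + 1 := by positivity
  rw [P_get prev _ ha0 han]
  rw [P_get prev _ (by omega) (by omega)]
  have hslice : max 0 ((j:Int) + 1 - 10) = max 0 ((j:Int) - 9) := by ring_nf
  rw [hslice, PySem.List.slice_toNat prev ha0 hb0]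
  rw [sum_drop_take prev _ _ (by omega)]
  rcases le_or_gt ((j:Int)+1) (n:Int) with hle | hlt
  · rw [min_eq_left hle]
  · rw [min_eq_right (le_of_lt hlt)]
    simp only [Int.toNat_natCast]
    rw [List.take_of_length_le (by omega), hn, List.take_length]
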